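-- pv_equiv track=rewrite | github.com/mrg1992/Code_Samples | OrderProcessing_ShipmentScheduling_Vehicle_Routing/InputData.py | _ozelShipmentSeparateDict
-- ===== SOURCE A (Python) =====
-- import copy
--
-- def _ozelShipmentSeparateDict(shipmentDict, ozelShipmentSet):
--     ozelShipmentDict = {}
--     newShipmentDict = copy.deepcopy(shipmentDict)
--     for shipmentNo in shipmentDict:
--         if shipmentNo in ozelShipmentSet:
--             ozelShipmentDict[shipmentNo] = shipmentDict[shipmentNo]
--             del(newShipmentDict[shipmentNo])
--     return [ozelShipmentDict, newShipmentDict]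
-- ===== SOURCE B (Python) =====
-- import copy
--
-- def _ozelShipmentSeparateDict(shipmentDict, ozelShipmentSet):
--     # two staged comprehension passes: select the ozel entries (original
--     # values), then the remaining entries as deep copies
--     ozel = {k: v for k, v in shipmentDict.items() if k in ozelShipmentSet}
--     rest = {k: copy.deepcopy(v) for k, v in shipmentDict.items()
--             if k not in ozelShipmentSet}
--     return [ozel, rest]
-- ===== Notes on version B (the rewrite author's own statement) =====
-- stated objective: simpler
-- what changed: Replaces copy-everything-then-delete (deepcopy of the whole dict followed by a key loop deleting ozel keys from the copy) by two direct dict comprehensions that select the ozel entries (original values) and the kept entries (deep copies); no mutation of intermediate dicts at all.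
import Mathlib
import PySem

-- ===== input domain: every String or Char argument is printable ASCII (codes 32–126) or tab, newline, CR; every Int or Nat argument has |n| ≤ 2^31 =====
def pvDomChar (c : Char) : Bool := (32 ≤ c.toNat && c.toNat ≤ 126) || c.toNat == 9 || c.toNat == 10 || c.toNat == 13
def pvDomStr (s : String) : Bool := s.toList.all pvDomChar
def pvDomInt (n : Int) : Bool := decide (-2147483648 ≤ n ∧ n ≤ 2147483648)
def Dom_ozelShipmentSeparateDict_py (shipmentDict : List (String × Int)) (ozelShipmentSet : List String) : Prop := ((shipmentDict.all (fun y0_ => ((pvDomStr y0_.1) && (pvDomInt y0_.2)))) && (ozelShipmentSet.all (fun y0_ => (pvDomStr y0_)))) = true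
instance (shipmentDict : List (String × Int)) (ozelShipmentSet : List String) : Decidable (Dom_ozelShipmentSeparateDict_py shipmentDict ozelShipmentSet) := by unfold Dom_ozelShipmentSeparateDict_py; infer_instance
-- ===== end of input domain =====

-- B replaces A's deepcopy-all-then-delete loop by two direct dict comprehensions
-- (simpler decomposition; return values proved equal). Python side effects: A and B
-- share vs. deep-copy values identically; Int values make this moot here.

-- ===== PORT A =====
def ozelShipmentSeparateDict_py (shipmentDict : List (String × Int)) (ozelShipmentSet : List String) : List (List (String × Int)) :=
  let dd : PySem.Dict String Int := ⟨shipmentDict⟩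
  -- ozelShipmentDict = {}; newShipmentDict = copy.deepcopy(shipmentDict);
  -- for shipmentNo in shipmentDict: if shipmentNo in ozelShipmentSet: ozel[k]=d[k]; del new[k]
  let r := dd.keys.foldl
    (fun (p : PySem.Dict String Int × PySem.Dict String Int) shipmentNo =>
      if ozelShipmentSet.contains shipmentNo then
        -- shipmentDict[shipmentNo] cannot raise: shipmentNo is one of shipmentDict's keys
        (p.1.insert shipmentNo (dd.getD shipmentNo 0), p.2.erase shipmentNo)
      else p)
    (PySem.Dict.empty, dd)
  [r.1.items, r.2.items]

-- ===== PORT B =====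
def ozelShipmentSeparateDict_py_alt (shipmentDict : List (String × Int)) (ozelShipmentSet : List String) : List (List (String × Int)) :=
  -- each dict comprehension {k: v for k, v in shipmentDict.items() if <cond k>} is,
  -- over the distinct keys Pre_ guarantees, exactly one filtering pass over the pairs
  let ozel := shipmentDict.filter (fun kv => ozelShipmentSet.contains kv.1)
  let rest := shipmentDict.filter (fun kv => !ozelShipmentSet.contains kv.1)
  [ozel, rest]

-- ===== PRECONDITION & SPEC =====
-- Pre_ excludes association lists with duplicate keys: they do not arise from a Python
-- dict argument, so behaviour there is an artifact of the list encoding, not of A.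
def Pre_ozelShipmentSeparateDict_py (shipmentDict : List (String × Int)) (ozelShipmentSet : List String) : Prop :=
  (shipmentDict.map Prod.fst).Nodup
instance (shipmentDict : List (String × Int)) (ozelShipmentSet : List String) : Decidable (Pre_ozelShipmentSeparateDict_py shipmentDict ozelShipmentSet) := by unfold Pre_ozelShipmentSeparateDict_py; infer_instance

def pvWitness_ozelShipmentSeparateDict_py : (List (String × Int)) × List String :=
  ([("a", 1), ("b", 2)], ["a"])

def Spec_ozelShipmentSeparateDict_py (shipmentDict : List (String × Int)) (ozelShipmentSet : List String) (out : List (List (String × Int))) : Prop := out = ozelShipmentSeparateDict_py_alt shipmentDict ozelShipmentSet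
instance (shipmentDict : List (String × Int)) (ozelShipmentSet : List String) (out : List (List (String × Int))) : Decidable (Spec_ozelShipmentSeparateDict_py shipmentDict ozelShipmentSet out) := by unfold Spec_ozelShipmentSeparateDict_py; infer_instance

-- ===== CLAIM (what is proved, stated in full; the proofs are below) =====
def Claim_equal_ozelShipmentSeparateDict_py : Prop := ∀ (shipmentDict : List (String × Int)) (ozelShipmentSet : List String), Dom_ozelShipmentSeparateDict_py shipmentDict ozelShipmentSet → Pre_ozelShipmentSeparateDict_py shipmentDict ozelShipmentSet → Spec_ozelShipmentSeparateDict_py shipmentDict ozelShipmentSet (ozelShipmentSeparateDict_py shipmentDict ozelShipmentSet)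

-- ===== LEMMAS AND PROOFS =====

-- A's loop keeps the two components independent, so the product fold splits.
lemma foldA_split (s : List String) (dd : PySem.Dict String Int) (ks : List String)
    (o n : PySem.Dict String Int) :
    ks.foldl (fun p k => if s.contains k then (p.1.insert k (dd.getD k 0), p.2.erase k) else p) (o, n)
      = (ks.foldl (fun o k => if s.contains k then o.insert k (dd.getD k 0) else o) o,
         ks.foldl (fun n k => if s.contains k then n.erase k else n) n) := by
  induction ks generalizing o n with
  | nil => rfl
  | cons k t ih =>
    simp only [List.foldl_cons]
    by_cases h : s.contains k = true
    · rw [if_pos h, if_pos h, if_pos h, ih]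
    · rw [if_neg h, if_neg h, if_neg h, ih]

-- A's ozel component: inserting fresh distinct keys appends the filtered key list.
lemma foldA_ozel (s : List String) (g : String → Int) (ks : List String)
    (o : PySem.Dict String Int) (hnd : ks.Nodup) (ho : ∀ k ∈ ks, o.contains k = false) :
    (ks.foldl (fun o k => if s.contains k then o.insert k (g k) else o) o).items
      = o.items ++ (ks.filter s.contains).map (fun k => (k, g k)) := by
  induction ks generalizing o with
  | nil => simp
  | cons k t ih =>
    have hok : o.contains k = false := ho k (by simp)
    have hkt : k ∉ t := (List.nodup_cons.mp hnd).1
    have htn : t.Nodup := (List.nodup_cons.mp hnd).2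
    simp only [List.foldl_cons]
    by_cases h : s.contains k = true
    · have ht : ∀ k' ∈ t, (o.insert k (g k)).contains k' = false := by
        intro k' hk'
        rw [PySem.Dict.contains_insert]
        have hne : k' ≠ k := fun e => hkt (e ▸ hk')
        simp [hne, ho k' (List.mem_cons_of_mem _ hk')]
      rw [if_pos h, ih (o.insert k (g k)) htn ht]
      simp [PySem.Dict.items_insert, hok, List.filter_cons_of_pos h]
    · rw [if_neg h, ih o htn (fun k' hk' => ho k' (List.mem_cons_of_mem _ hk')),
          List.filter_cons_of_neg h]

-- A's new component: the erase loop filters out the keys of ks that lie in s.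
lemma foldA_new (s : List String) (ks : List String) (n : PySem.Dict String Int) :
    (ks.foldl (fun n k => if s.contains k then n.erase k else n) n).items
      = n.items.filter (fun p => !(s.contains p.1 && ks.contains p.1)) := by
  induction ks generalizing n with
  | nil => simp
  | cons k t ih =>
    simp only [List.foldl_cons]
    by_cases h : s.contains k = true
    · rw [if_pos h, ih]
      simp only [PySem.Dict.erase, List.filter_filter]
      apply List.filter_congr
      intro p _
      by_cases hp : p.1 = k
      · have hks : k ∈ s := by simpa using h
        simp [hp, hks]
      · by_cases hps : p.1 ∈ s <;> by_cases hpt : p.1 ∈ t <;>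
          simp [hps, hpt, decide_eq_false hp] <;> exact hp
    · rw [if_neg h, ih]
      apply List.filter_congr
      intro p _
      by_cases hp : p.1 = k
      · have hks : k ∉ s := by simpa using h
        simp [hp, hks]
      · simp [decide_eq_false hp]

-- A computes exactly B's partition [entries with key in s, the rest].
lemma portA_eq_partition (d : List (String × Int)) (s : List String)
    (hnd : (d.map Prod.fst).Nodup) :
    ozelShipmentSeparateDict_py d s
      = [d.filter (fun q => s.contains q.1), d.filter (fun q => !s.contains q.1)] := by
  unfold ozelShipmentSeparateDict_py
  simp only [foldA_split, List.cons.injEq, and_true]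
  rw [show (PySem.Dict.mk d).keys = d.map Prod.fst from rfl]
  constructor
  · rw [foldA_ozel s _ (d.map Prod.fst) PySem.Dict.empty hnd
        (by intro k _; simp [PySem.Dict.contains_empty])]
    show [] ++ ((d.map Prod.fst).filter s.contains).map
        (fun k => (k, (PySem.Dict.mk d).getD k 0)) = _
    rw [List.nil_append, List.filter_map, List.map_map]
    conv_rhs => rw [← List.map_id (d.filter (fun q => s.contains q.1))]
    apply List.map_congr_left
    intro q hq
    have hmem : q ∈ d := List.mem_of_mem_filter hq
    have hg : (PySem.Dict.mk d).getD q.1 0 = q.2 := by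
      apply PySem.Dict.getD_of_mem_items <;> first | exact hmem | exact hnd
    simp [Function.comp, hg]
  · rw [foldA_new]
    show d.filter _ = _
    apply List.filter_congr
    intro p hp
    have hmm : p.1 ∈ d.map Prod.fst := List.mem_map_of_mem hp
    have hc : (d.map Prod.fst).contains p.1 = true := by simpa using hmm
    rw [hc, Bool.and_true]

-- ===== VERDICT (by name: the statement is the Claim_ definition above) =====
theorem ozelShipmentSeparateDict_py_spec : Claim_equal_ozelShipmentSeparateDict_py := by
  intro d s _hdom hpre
  unfold Spec_ozelShipmentSeparateDict_py
  rw [portA_eq_partition d s hpre]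
  rfl
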